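-- pv_equiv track=rewrite | github.com/isk02206/python | informatics/previous informatics/Informatics-2/series 8/homo_hetro.py | homoOrHetero
-- ===== SOURCE A (Python) =====
-- def  homoOrHetero(list1):
--     dict = {}
--     for x in list1:
--         dict[x] = list1.count(x)
--
--     groupA = []
--     groupB = []
--
--     for key, value in dict.items():
--         groupA += [key]
--         groupB += [value]
--
--     if len(groupA) == 1:
--         if groupB[0] != 1:
--             return 'homo'
--         else:
--             return 'nothing'
--     elif len(groupA) != 1:
--         for y in groupB:
--             if y != 1:
--                 return 'both'
--         else:
--             if list1 == []:
--                 return 'nothing'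
--
--             else:
--                 return 'hetero'
-- ===== SOURCE B (Python) =====
-- def homoOrHetero(list1):
--     n = len(list1)
--     d = len(set(list1))
--     if d == 1:
--         return 'homo' if n != 1 else 'nothing'
--     if d == n:
--         return 'nothing' if list1 == [] else 'hetero'
--     return 'both'
-- ===== Notes on version B (the rewrite author's own statement) =====
-- stated objective: simpler
-- what changed: Replaces the frequency dict plus key/value group lists and the scan for a count != 1 by two numbers computed up front -- the length n and the number of distinct elements d -- and classifies purely from (n, d).
import Mathlib
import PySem

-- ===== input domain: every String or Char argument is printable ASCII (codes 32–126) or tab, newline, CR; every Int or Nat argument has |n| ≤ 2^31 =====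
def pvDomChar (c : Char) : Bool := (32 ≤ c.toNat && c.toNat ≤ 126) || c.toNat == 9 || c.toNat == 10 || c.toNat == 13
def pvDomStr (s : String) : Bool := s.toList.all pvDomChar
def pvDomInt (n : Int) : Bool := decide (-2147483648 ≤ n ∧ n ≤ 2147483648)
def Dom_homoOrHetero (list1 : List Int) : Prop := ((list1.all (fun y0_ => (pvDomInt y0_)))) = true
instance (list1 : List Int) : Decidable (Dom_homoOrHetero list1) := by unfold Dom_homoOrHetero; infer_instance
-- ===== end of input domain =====

-- B classifies from the length and the number of distinct elements only, dropping A's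
-- frequency dict, the two group lists and the scan for a count ≠ 1 (simpler; O(n) vs A's O(n²)).

-- ===== PORT A =====
-- dict[x] = list1.count(x) loop, then the key/value group lists, then A's branch chain.
def homoOrHetero (list1 : List Int) : String :=
  let dict : PySem.Dict Int Int :=
    list1.foldl (fun d x => d.insert x ((list1.count x : Int))) PySem.Dict.empty
  let gp : List Int × List Int :=
    dict.items.foldl (fun ab kv => (ab.1 ++ [kv.1], ab.2 ++ [kv.2])) ([], [])
  let groupA := gp.1
  let groupB := gp.2
  if groupA.length = 1 then
    -- groupB[0]: index 0 is in range here (len groupB = len groupA = 1), so pyGetD is exact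
    if PySem.List.pyGetD groupB (0 : Int) 0 ≠ 1 then "homo" else "nothing"
  else
    -- for y in groupB: if y != 1: return 'both'  … else (for-else): the empty/hetero branch
    if groupB.any (fun y => decide (y ≠ 1)) then "both"
    else if list1 = [] then "nothing"
    else "hetero"

-- ===== PORT B =====
def homoOrHetero_alt (list1 : List Int) : String :=
  let n : Int := PySem.List.len list1
  let d : Int := PySem.Set.len (PySem.Set.ofList list1)
  if d = 1 then (if n ≠ 1 then "homo" else "nothing")
  else if d = n then (if list1 = [] then "nothing" else "hetero")
  else "both"

-- ===== PRECONDITION & SPEC =====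
def Spec_homoOrHetero (list1 : List Int) (out : String) : Prop := out = homoOrHetero_alt list1
instance (list1 : List Int) (out : String) : Decidable (Spec_homoOrHetero list1 out) := by unfold Spec_homoOrHetero; infer_instance

-- ===== CLAIM (what is proved, stated in full; the proofs are below) =====
def Claim_equal_homoOrHetero : Prop := ∀ (list1 : List Int), Dom_homoOrHetero list1 → Spec_homoOrHetero list1 (homoOrHetero list1)

-- ===== LEMMAS AND PROOFS =====

-- get? of the insert-constant-value loop
theorem get?_foldl_insert_fn (g : Int → Int) (l : List Int) (d : PySem.Dict Int Int) (k : Int) :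
    (l.foldl (fun d x => d.insert x (g x)) d).get? k
      = if k ∈ l then some (g k) else d.get? k := by
  induction l generalizing d with
  | nil => simp
  | cons x t ih =>
      simp only [List.foldl_cons, ih, List.mem_cons]
      by_cases ht : k ∈ t
      · simp [ht]
      · by_cases hx : k = x
        · simp [hx, PySem.Dict.get?_insert_self]
        · simp [ht, hx, PySem.Dict.get?_insert]

-- items of A's dict: ordered distinct keys paired with their counts
theorem items_dict (list1 : List Int) :
    (list1.foldl (fun d x => d.insert x ((list1.count x : Int))) PySem.Dict.empty).items
      = (PySem.Set.ofList list1).map (fun k => (k, (list1.count k : Int))) := by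
  set D := list1.foldl (fun d x => d.insert x ((list1.count x : Int))) PySem.Dict.empty with hD
  have hkeys : D.keys = PySem.Set.ofList list1 := by
    rw [hD, PySem.Dict.keys_foldl_insert]
    simp [PySem.Dict.keys_empty, PySem.Set.update_nil_left]
  have hnodup : D.keys.Nodup := by
    rw [hkeys]; exact PySem.Set.nodup_ofList _
  have hval : ∀ p ∈ D.items, p = (p.1, (list1.count p.1 : Int)) := by
    intro p hp
    have h1 : D.get? p.1 = some p.2 := PySem.Dict.get?_of_mem_items _ hp hnodup
    have h2 : D.get? p.1 = some ((list1.count p.1 : Int)) := by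
      rw [hD, get?_foldl_insert_fn]
      have : p.1 ∈ list1 := by
        have : p.1 ∈ D.keys := PySem.Dict.mem_keys_of_mem_items _ hp
        rw [hkeys] at this
        exact (PySem.Set.mem_ofList _ _).mp this
      simp [this]
    have := h1.symm.trans h2
    simp only [Option.some.injEq] at this
    exact Prod.ext rfl this
  calc D.items = D.items.map (fun p => (p.1, (list1.count p.1 : Int))) := by
        conv_lhs => rw [← List.map_id D.items]
        exact List.map_congr_left (fun p hp => (hval p hp))
    _ = (D.items.map Prod.fst).map (fun k => (k, (list1.count k : Int))) := by
        rw [List.map_map]; rfl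
    _ = (PySem.Set.ofList list1).map (fun k => (k, (list1.count k : Int))) := by
        rw [← PySem.Dict.keys, hkeys]

-- length of a list = sum of the counts of its distinct elements
theorem length_eq_sum_counts (list1 : List Int) :
    list1.length = ((PySem.Set.ofList list1).map (fun k => list1.count k)).sum := by
  have hperm : (PySem.Set.ofList list1).Perm list1.dedup := by
    apply (List.perm_ext_iff_of_nodup (PySem.Set.nodup_ofList _) list1.nodup_dedup).mpr
    intro a
    rw [PySem.Set.mem_ofList, List.mem_dedup]
  have := List.Perm.sum_eq (List.Perm.map (fun k => list1.count k) hperm)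
  rw [this, List.sum_map_count_dedup_eq_length]

-- ===== VERDICT (by name: the statement is the Claim_ definition above) =====
theorem homoOrHetero_spec : Claim_equal_homoOrHetero := by
  intro list1 _
  unfold Spec_homoOrHetero homoOrHetero homoOrHetero_alt
  simp only [items_dict]
  rw [PySem.List.foldl_prod_mk (f := fun acc (e : Int × Int) => acc ++ [e.1])
        (g := fun acc (e : Int × Int) => acc ++ [e.2])]
  rw [PySem.List.foldl_append_singleton_eq_map, PySem.List.foldl_append_singleton_eq_map]
  simp only [List.map_map]
  have hA : (PySem.Set.ofList list1).map (Prod.fst ∘ fun k => (k, (list1.count k : Int)))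
      = PySem.Set.ofList list1 := by
    have := List.map_congr_left (l := PySem.Set.ofList list1)
      (f := Prod.fst ∘ fun k => (k, (list1.count k : Int))) (g := id) (fun x _ => rfl)
    simpa using this
  have hB : (PySem.Set.ofList list1).map (Prod.snd ∘ fun k => (k, (list1.count k : Int)))
      = (PySem.Set.ofList list1).map (fun k => (list1.count k : Int)) :=
    List.map_congr_left (fun x _ => rfl)
  rw [hA, hB]
  have hmem : ∀ x ∈ list1, x ∈ PySem.Set.ofList list1 :=
    fun x hx => (PySem.Set.mem_ofList _ _).mpr hx
  have hcnt : ∀ k ∈ PySem.Set.ofList list1, 1 ≤ list1.count k := by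
    intro k hk
    exact List.count_pos_iff.mpr ((PySem.Set.mem_ofList _ _).mp hk)
  have hsum := length_eq_sum_counts list1
  rcases hksv : PySem.Set.ofList list1 with - | ⟨k, - | ⟨k2, kt⟩⟩
  · -- ks = []: list1 = []
    have hnil : list1 = [] := by
      cases h : list1 with
      | nil => rfl
      | cons a t =>
          exfalso
          have := hmem a (by rw [h]; exact List.mem_cons_self)
          rw [hksv] at this
          exact absurd this (List.not_mem_nil)
    subst hnil
    simp [PySem.List.len, PySem.Set.len]
  · -- ks = [k]: every element is k, so count k = length
    rw [hksv] at hmem hcnt hsum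
    have hall : ∀ b ∈ list1, k = b := by
      intro b hb
      have := hmem b hb
      rw [List.mem_singleton] at this
      exact this.symm
    have hc : list1.count k = list1.length := List.count_eq_length.mpr hall
    by_cases h1 : list1.length = 1
    · simp [PySem.List.pyGetD, PySem.List.pyIdx?, PySem.List.pyGet?, PySem.List.len,
        PySem.Set.len, hc, h1]
    · have h1' : (list1.length : Int) ≠ 1 := by exact_mod_cast h1
      simp [PySem.List.pyGetD, PySem.List.pyIdx?, PySem.List.pyGet?, PySem.List.len,
        PySem.Set.len, hc, h1']
  · -- ks has at least two elements
    rw [hksv] at hmem hcnt hsum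
    have hne0 : list1 ≠ [] := by
      intro h
      rw [h] at hksv
      simp [PySem.Set.ofList] at hksv
    set ks : List Int := k :: k2 :: kt with hks2
    have hlen2 : 2 ≤ ks.length := by rw [hks2]; simp
    have hlenne : ks.length ≠ 1 := by omega
    by_cases hany : ∃ j ∈ ks, list1.count j ≠ 1
    · -- some count ≥ 2: length > number of distinct elements; both sides give "both"
      obtain ⟨j, hj, hjc⟩ := hany
      have hgt : ks.length < list1.length := by
        rw [hsum]
        calc ks.length = (ks.map (fun _ => (1 : Nat))).sum := by simp
          _ < (ks.map (fun j => list1.count j)).sum := by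
              apply List.sum_lt_sum
              · intro i hi; simpa using hcnt i hi
              · exact ⟨j, hj, by have := hcnt j hj; simp; omega⟩
      have hdn : (ks.length : Int) ≠ (list1.length : Int) := by
        exact_mod_cast Nat.ne_of_lt hgt
      have hex : ∃ x ∈ ks, ¬ list1.count x = 1 := ⟨j, hj, hjc⟩
      simp [PySem.Set.len, PySem.List.len, hlenne, hex, hdn]
    · -- every count is 1: length = number of distinct elements; both sides give "hetero"
      push Not at hany
      have heq : ks.length = list1.length := by
        rw [hsum, List.map_congr_left (fun j hj => hany j hj)]
        simp
      have hdn : (ks.length : Int) = (list1.length : Int) := by exact_mod_cast heq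
      have hex : ¬ ∃ x ∈ ks, ¬ list1.count x = 1 := by push Not; exact hany
      have h1' : list1.length ≠ 1 := by omega
      simp [PySem.Set.len, PySem.List.len, hlenne, hne0, hex, hdn, h1']
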